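-- pv_equiv track=rewrite | github.com/hduc1207/dfs-scheduler | DFS1.py | tim_gio_ranh_tiep_theo
-- ===== SOURCE A (Python) =====
-- def tim_gio_ranh_tiep_theo(bac_si, lich_hien_tai, thoi_gian):
--     lich = sorted(lich_hien_tai.get(bac_si, []))
--     for bd, kt in lich:
--         if thoi_gian < bd:
--             return thoi_gian
--         elif bd <= thoi_gian < kt:
--             thoi_gian = kt
--     return thoi_gian
-- ===== SOURCE B (Python) =====
-- def tim_gio_ranh_tiep_theo(bac_si, lich_hien_tai, thoi_gian):
--     khoang = lich_hien_tai.get(bac_si, [])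
--     moved = True
--     while moved:
--         moved = False
--         for bd, kt in khoang:
--             if bd <= thoi_gian < kt:
--                 thoi_gian = kt
--                 moved = True
--                 break
--     return thoi_gian
-- ===== Notes on version B (the rewrite author's own statement) =====
-- stated objective: simpler
-- what changed: Replaces sort + one ordered pass by a sort-free fixpoint loop: rescan the intervals in given order, jump to the end of any interval covering the current time, until a full scan finds no cover.
import Mathlib
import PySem

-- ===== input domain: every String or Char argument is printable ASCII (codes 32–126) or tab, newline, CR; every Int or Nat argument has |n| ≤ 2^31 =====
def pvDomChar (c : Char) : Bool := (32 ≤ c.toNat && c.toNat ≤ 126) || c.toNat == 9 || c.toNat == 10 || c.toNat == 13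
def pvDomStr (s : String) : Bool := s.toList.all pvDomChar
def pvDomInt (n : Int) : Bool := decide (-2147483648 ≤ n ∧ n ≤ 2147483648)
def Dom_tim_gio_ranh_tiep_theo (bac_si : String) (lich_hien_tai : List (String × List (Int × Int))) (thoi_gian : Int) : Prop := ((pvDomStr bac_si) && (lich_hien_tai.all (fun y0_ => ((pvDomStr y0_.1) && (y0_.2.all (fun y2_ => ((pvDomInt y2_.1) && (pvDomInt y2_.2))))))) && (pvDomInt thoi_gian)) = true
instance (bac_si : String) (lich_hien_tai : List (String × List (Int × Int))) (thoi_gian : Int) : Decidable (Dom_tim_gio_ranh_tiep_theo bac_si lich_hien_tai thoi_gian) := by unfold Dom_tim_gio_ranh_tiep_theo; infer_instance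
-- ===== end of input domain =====

-- B replaces A's sort + single ordered pass by a sort-free repeated-rescan fixpoint loop (objective: simpler — no sort needed).

-- ===== PORT A =====
-- the 'for bd, kt in lich' loop of A: early return on thoi_gian < bd, advance on cover
def pvAScan (t : Int) : List (Int × Int) → Int
  | [] => t
  | (bd, kt) :: rest =>
    if t < bd then t
    else if bd ≤ t ∧ t < kt then pvAScan kt rest
    else pvAScan t rest

def tim_gio_ranh_tiep_theo (bac_si : String) (lich_hien_tai : List (String × List (Int × Int))) (thoi_gian : Int) : Int :=
  -- sorted(lich_hien_tai.get(bac_si, [])) : Python tuple order = lexicographic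
  let lich := PySem.List.sorted2 ((PySem.Dict.mk lich_hien_tai).getD bac_si []) (fun p => p.1) (fun p => p.2)
  pvAScan thoi_gian lich

-- ===== PORT B =====
-- the inner 'for' loop of B: first interval covering t, returning its end (none = scan found no cover)
def pvFindCover (t : Int) : List (Int × Int) → Option Int
  | [] => none
  | (bd, kt) :: rest => if bd ≤ t ∧ t < kt then some kt else pvFindCover t rest

lemma pvFindCover_lt {t k : Int} : ∀ {L : List (Int × Int)}, pvFindCover t L = some k → t < k := by
  intro L
  induction L with
  | nil => simp [pvFindCover]
  | cons p rest ih =>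
    obtain ⟨bd, kt⟩ := p
    simp only [pvFindCover]
    split_ifs with h
    · rintro ⟨rfl⟩; exact h.2
    · exact ih

lemma pvFilter_mono {t k : Int} (h : t ≤ k) : ∀ (L : List (Int × Int)),
    (L.filter (fun p => decide (k < p.2))).length ≤ (L.filter (fun p => decide (t < p.2))).length := by
  intro L
  induction L with
  | nil => simp
  | cons p rest ih =>
    simp only [List.filter_cons]
    split_ifs with h1 h2 <;> simp_all <;> omega

lemma pvMeasure_lt {t k : Int} : ∀ {L : List (Int × Int)}, pvFindCover t L = some k →
    (L.filter (fun p => decide (k < p.2))).length < (L.filter (fun p => decide (t < p.2))).length := by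
  intro L
  induction L with
  | nil => simp [pvFindCover]
  | cons p rest ih =>
    obtain ⟨bd, kt⟩ := p
    simp only [pvFindCover]
    split_ifs with h
    · intro hk
      injection hk with hk'
      subst hk'
      have h1 : ¬ (kt < kt) := lt_irrefl kt
      have h2 : t < kt := h.2
      simp [h2]
      have := pvFilter_mono (le_of_lt h2) rest
      omega
    · intro hc
      have ht : t < k := pvFindCover_lt hc
      have hs := ih hc
      simp only [List.filter_cons]
      split_ifs with h1 h2 <;> simp_all <;> omega

-- the outer 'while moved' loop of B: repeat the scan until no interval covers t
def pvAdvance (L : List (Int × Int)) (t : Int) : Int :=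
  match h : pvFindCover t L with
  | none => t  -- h names the scrutinee for decreasing_by
  | some k => pvAdvance L k
termination_by (L.filter (fun p => decide (t < p.2))).length
decreasing_by exact pvMeasure_lt h

def tim_gio_ranh_tiep_theo_alt (bac_si : String) (lich_hien_tai : List (String × List (Int × Int))) (thoi_gian : Int) : Int :=
  pvAdvance ((PySem.Dict.mk lich_hien_tai).getD bac_si []) thoi_gian

-- ===== PRECONDITION & SPEC =====
def Spec_tim_gio_ranh_tiep_theo (bac_si : String) (lich_hien_tai : List (String × List (Int × Int))) (thoi_gian : Int) (out : Int) : Prop := out = tim_gio_ranh_tiep_theo_alt bac_si lich_hien_tai thoi_gian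
instance (bac_si : String) (lich_hien_tai : List (String × List (Int × Int))) (thoi_gian : Int) (out : Int) : Decidable (Spec_tim_gio_ranh_tiep_theo bac_si lich_hien_tai thoi_gian out) := by unfold Spec_tim_gio_ranh_tiep_theo; infer_instance

-- ===== CLAIM (what is proved, stated in full; the proofs are below) =====
def Claim_equal_tim_gio_ranh_tiep_theo : Prop := ∀ (bac_si : String) (lich_hien_tai : List (String × List (Int × Int))) (thoi_gian : Int), Dom_tim_gio_ranh_tiep_theo bac_si lich_hien_tai thoi_gian → Spec_tim_gio_ranh_tiep_theo bac_si lich_hien_tai thoi_gian (tim_gio_ranh_tiep_theo bac_si lich_hien_tai thoi_gian)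

-- ===== LEMMAS AND PROOFS =====

-- "some interval of L covers time t"
def pvCov (L : List (Int × Int)) (t : Int) : Prop := ∃ p ∈ L, p.1 ≤ t ∧ t < p.2

lemma pvFindCover_none_iff {t : Int} {L : List (Int × Int)} :
    pvFindCover t L = none ↔ ¬ pvCov L t := by
  induction L with
  | nil => simp [pvFindCover, pvCov]
  | cons p rest ih =>
    obtain ⟨bd, kt⟩ := p
    simp only [pvFindCover, pvCov] at *
    split_ifs with hc <;> simp_all

-- B's loop result: at least t
lemma pvAdvance_ge (L : List (Int × Int)) (t : Int) : t ≤ pvAdvance L t := by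
  fun_induction pvAdvance L t with
  | case1 => exact le_refl _
  | case2 t k h ih => exact le_of_lt (lt_of_lt_of_le (pvFindCover_lt h) ih)

-- B's loop result: uncovered
lemma pvAdvance_not_cov (L : List (Int × Int)) (t : Int) : ¬ pvCov L (pvAdvance L t) := by
  fun_induction pvAdvance L t with
  | case1 t h => exact pvFindCover_none_iff.mp h
  | case2 t k h ih => exact ih

-- B's loop result: least uncovered time ≥ t
lemma pvFindCover_some {t k : Int} : ∀ {L : List (Int × Int)}, pvFindCover t L = some k →
    ∃ p ∈ L, p.1 ≤ t ∧ t < p.2 ∧ p.2 = k := by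
  intro L
  induction L with
  | nil => simp [pvFindCover]
  | cons q rest ihq =>
    obtain ⟨bd, kt⟩ := q
    simp only [pvFindCover]
    split_ifs with hc
    · intro hk
      injection hk with hk'
      subst hk'
      exact ⟨(bd, kt), by simp, hc.1, hc.2, rfl⟩
    · intro h
      obtain ⟨p, hp, h1, h2, h3⟩ := ihq h
      exact ⟨p, List.mem_cons_of_mem _ hp, h1, h2, h3⟩

-- B's loop result: least uncovered time ≥ t
lemma pvAdvance_le (L : List (Int × Int)) (t u : Int) (htu : t ≤ u) (hu : ¬ pvCov L u) :
    pvAdvance L t ≤ u := by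
  fun_induction pvAdvance L t with
  | case1 => exact htu
  | case2 t k h ih =>
    apply ih
    obtain ⟨p, hp, h1, h2, h3⟩ := pvFindCover_some h
    -- p ∈ L, p.1 ≤ t, t < p.2, p.2 = k; u uncovered so u ∉ [p.1, p.2): since p.1 ≤ t ≤ u, u ≥ p.2 = k
    by_contra hlt
    rw [not_le] at hlt
    exact hu ⟨p, hp, le_trans h1 htu, h3 ▸ hlt⟩

-- A's scan result: at least t
lemma pvAScan_ge (t : Int) (L : List (Int × Int)) : t ≤ pvAScan t L := by
  induction L generalizing t with
  | nil => simp [pvAScan]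
  | cons p rest ih =>
    obtain ⟨bd, kt⟩ := p
    simp only [pvAScan]
    split_ifs with h1 h2
    · exact le_refl _
    · exact le_trans (le_of_lt h2.2) (ih kt)
    · exact ih t

-- A's scan result on a start-sorted list: uncovered
lemma pvAScan_not_cov (t : Int) (L : List (Int × Int))
    (hs : L.Pairwise (fun a b => a.1 ≤ b.1)) : ¬ pvCov L (pvAScan t L) := by
  induction L generalizing t with
  | nil => simp [pvCov]
  | cons p rest ih =>
    obtain ⟨bd, kt⟩ := p
    obtain ⟨hhead, hrest⟩ := List.pairwise_cons.mp hs
    simp only [pvAScan]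
    split_ifs with h1 h2
    · rintro ⟨q, hq, hq1, hq2⟩
      rcases List.mem_cons.mp hq with rfl | hq'
      · omega
      · have := hhead q hq'; simp at this; omega
    · rintro ⟨q, hq, hq1, hq2⟩
      rcases List.mem_cons.mp hq with rfl | hq'
      · have := pvAScan_ge kt rest; simp at hq2 ⊢; omega
      · exact ih kt hrest ⟨q, hq', hq1, hq2⟩
    · rintro ⟨q, hq, hq1, hq2⟩
      rcases List.mem_cons.mp hq with rfl | hq'
      · have := pvAScan_ge t rest; simp at hq2 ⊢; omega
      · exact ih t hrest ⟨q, hq', hq1, hq2⟩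

-- A's scan result: least uncovered time ≥ t
lemma pvAScan_le (t u : Int) (L : List (Int × Int)) (htu : t ≤ u) (hu : ¬ pvCov L u) :
    pvAScan t L ≤ u := by
  induction L generalizing t with
  | nil => simpa [pvAScan] using htu
  | cons p rest ih =>
    obtain ⟨bd, kt⟩ := p
    have hu' : ¬ pvCov rest u := fun ⟨q, hq, h⟩ => hu ⟨q, List.mem_cons_of_mem _ hq, h⟩
    simp only [pvAScan]
    split_ifs with h1 h2
    · exact htu
    · have hku : kt ≤ u := by
        by_contra hlt
        rw [not_le] at hlt
        exact hu ⟨(bd, kt), by simp, le_trans h2.1 htu, hlt⟩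
      exact ih kt hku hu'
    · exact ih t htu hu' 

-- sorted2's comparison on pairs (Python lexicographic tuple order), as used by A's sorted
def pvLex (a b : Int × Int) : Bool := decide (a.1 < b.1) || (!decide (b.1 < a.1) && decide (a.2 < b.2))

lemma pvSorted2_eq (L : List (Int × Int)) :
    PySem.List.sorted2 L (fun p => p.1) (fun p => p.2) =
      L.foldl (fun acc x => PySem.List.insertBy pvLex x acc) [] := rfl

lemma pvInsertBy_pairwise (x : Int × Int) (ys : List (Int × Int))
    (h : ys.Pairwise (fun a b => a.1 ≤ b.1)) :
    (PySem.List.insertBy pvLex x ys).Pairwise (fun a b => a.1 ≤ b.1) := by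
  induction ys with
  | nil => simp [PySem.List.insertBy]
  | cons y ys ih =>
    obtain ⟨hy, hys⟩ := List.pairwise_cons.mp h
    simp only [PySem.List.insertBy]
    split_ifs with hb
    · have hxy : x.1 ≤ y.1 := by
        simp only [pvLex, Bool.or_eq_true, Bool.and_eq_true, Bool.not_eq_true',
          decide_eq_true_eq, decide_eq_false_iff_not] at hb
        rcases hb with h | ⟨h, _⟩ <;> omega
      refine List.pairwise_cons.mpr ⟨?_, h⟩
      intro z hz
      rcases List.mem_cons.mp hz with rfl | hz'
      · exact hxy
      · exact le_trans hxy (hy z hz')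
    · have hyx : y.1 ≤ x.1 := by
        simp only [pvLex, Bool.or_eq_true, Bool.and_eq_true, Bool.not_eq_true',
          decide_eq_true_eq, decide_eq_false_iff_not] at hb
        rcases not_or.mp hb with ⟨hb1, hb2⟩
        rcases not_and_or.mp hb2 with hb3 | hb4 <;> omega
      refine List.pairwise_cons.mpr ⟨?_, ih hys⟩
      intro z hz
      rcases (PySem.List.mem_insertBy _ _ _ _).mp hz with rfl | hz'
      · exact hyx
      · exact hy z hz'

lemma pvSorted2_pairwise (L : List (Int × Int)) :
    (PySem.List.sorted2 L (fun p => p.1) (fun p => p.2)).Pairwise (fun a b => a.1 ≤ b.1) := by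
  rw [pvSorted2_eq]
  suffices h : ∀ acc : List (Int × Int), acc.Pairwise (fun a b => a.1 ≤ b.1) →
      (L.foldl (fun acc x => PySem.List.insertBy pvLex x acc) acc).Pairwise (fun a b => a.1 ≤ b.1) by
    exact h [] (by simp)
  induction L with
  | nil => intro acc h; simpa using h
  | cons x xs ih =>
    intro acc h
    exact ih _ (pvInsertBy_pairwise x acc h)

lemma pvCov_sorted2_iff (L : List (Int × Int)) (t : Int) :
    pvCov (PySem.List.sorted2 L (fun p => p.1) (fun p => p.2)) t ↔ pvCov L t := by
  unfold pvCov
  constructor <;> rintro ⟨p, hp, h⟩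
  · exact ⟨p, (PySem.List.sorted2_perm L _ _ false).mem_iff.mp hp, h⟩
  · exact ⟨p, (PySem.List.sorted2_perm L _ _ false).mem_iff.mpr hp, h⟩

-- ===== VERDICT (by name: the statement is the Claim_ definition above) =====
theorem tim_gio_ranh_tiep_theo_spec : Claim_equal_tim_gio_ranh_tiep_theo := by
  intro bac_si lich_hien_tai thoi_gian _
  unfold Spec_tim_gio_ranh_tiep_theo tim_gio_ranh_tiep_theo tim_gio_ranh_tiep_theo_alt
  set L := (PySem.Dict.mk lich_hien_tai).getD bac_si [] with hL
  set S := PySem.List.sorted2 L (fun p => p.1) (fun p => p.2) with hS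
  show pvAScan thoi_gian S = pvAdvance L thoi_gian
  have hpair := pvSorted2_pairwise L
  have hBnc : ¬ pvCov S (pvAdvance L thoi_gian) :=
    fun h => pvAdvance_not_cov L thoi_gian ((pvCov_sorted2_iff L _).mp h)
  have hAnc : ¬ pvCov L (pvAScan thoi_gian S) :=
    fun h => pvAScan_not_cov thoi_gian S hpair ((pvCov_sorted2_iff L _).mpr h)
  exact le_antisymm (pvAScan_le _ _ _ (pvAdvance_ge L thoi_gian) hBnc)
    (pvAdvance_le L _ _ (pvAScan_ge thoi_gian S) hAnc)
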